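-- pv_equiv track=rewrite | github.com/marzukr/aoc2019 | 4/solution.py | dup_check
-- ===== SOURCE A (Python) =====
-- def dup_check(str_n):
--     is_valid = False
--     for dup in range(0, 10):
--         str_grp = str(dup)*3
--         str_dup = str(dup)*2
--         if str_dup in str_n and str_grp not in str_n:
--             is_valid = True
--             break
--     return is_valid
-- ===== SOURCE B (Python) =====
-- def dup_check(str_n):
--     # One pass: group consecutive equal characters into runs, then judge digit runs.
--     runs = []
--     for ch in str_n:
--         if runs and runs[-1][0] == ch:
--             runs[-1][1] += 1
--         else:
--             runs.append([ch, 1])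
--     triples = {c for c, n in runs if n >= 3}
--     return any(c.isdigit() and n == 2 and c not in triples for c, n in runs)
-- ===== Notes on version B (the rewrite author's own statement) =====
-- stated objective: alternative
-- what changed: Replaces A's ten passes of substring searches ('dd' in s, 'ddd' in s for each digit) with a single left-to-right pass grouping the string into runs, then judging digit runs of length exactly 2 against the set of digits having a run of length >= 3.
import Mathlib
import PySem

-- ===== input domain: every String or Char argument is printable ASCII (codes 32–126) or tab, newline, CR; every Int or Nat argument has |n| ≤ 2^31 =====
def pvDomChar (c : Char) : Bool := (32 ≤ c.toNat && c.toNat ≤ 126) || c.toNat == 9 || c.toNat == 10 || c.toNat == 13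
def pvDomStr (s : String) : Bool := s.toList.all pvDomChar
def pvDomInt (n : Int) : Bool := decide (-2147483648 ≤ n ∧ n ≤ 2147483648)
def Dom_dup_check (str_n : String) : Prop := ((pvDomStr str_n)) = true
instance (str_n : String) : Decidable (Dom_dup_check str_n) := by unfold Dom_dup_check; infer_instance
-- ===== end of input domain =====

-- B replaces A's ten passes of digit-pair/triple substring tests by one pass grouping the
-- string into runs of equal characters (objective: alternative single-pass algorithm).

-- ===== PORT A =====
-- the 'for dup in range(0, 10)' loop with its break: returns true at the first digit that fires
def dupLoopA (s : List Char) : List Int → Bool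
  | [] => false
  | d :: rest =>
      let str_grp := PySem.List.pyRepeat (PySem.Int.toChars d) 3
      let str_dup := PySem.List.pyRepeat (PySem.Int.toChars d) 2
      if PySem.Chars.isIn str_dup s && !(PySem.Chars.isIn str_grp s) then true
      else dupLoopA s rest

def dup_check (str_n : String) : Bool :=
  dupLoopA str_n.toList (PySem.List.pyRange 0 10 1)

-- ===== PORT B =====
-- B's run-building loop: current run char c with its count n, consuming the rest of the string
def pvRunsAux (c : Char) (n : Nat) : List Char → List (Char × Nat)
  | [] => [(c, n)]
  | x :: xs => if x = c then pvRunsAux c (n + 1) xs else (c, n) :: pvRunsAux x 1 xs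

def pvRuns : List Char → List (Char × Nat)
  | [] => []
  | x :: xs => pvRunsAux x 1 xs

def dup_check_alt (str_n : String) : Bool :=
  let runs := pvRuns str_n.toList
  let triples : PySem.Set Char :=
    PySem.Set.ofList ((runs.filter (fun p => 3 ≤ p.2)).map Prod.fst)
  runs.any (fun p => PySem.Chars.isdigit p.1 && p.2 == 2 && !(PySem.Set.contains triples p.1))

-- ===== PRECONDITION & SPEC =====
def Spec_dup_check (str_n : String) (out : Bool) : Prop := out = dup_check_alt str_n
instance (str_n : String) (out : Bool) : Decidable (Spec_dup_check str_n out) := by unfold Spec_dup_check; infer_instance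

-- ===== CLAIM (what is proved, stated in full; the proofs are below) =====
def Claim_equal_dup_check : Prop := ∀ (str_n : String), Dom_dup_check str_n → Spec_dup_check str_n (dup_check str_n)

-- ===== LEMMAS AND PROOFS =====

-- the per-digit property both programs decide: a run of length ≥ 2 and no run of length ≥ 3
def pvQ (l : List Char) (c : Char) : Prop :=
  (∃ m, (c, m) ∈ pvRuns l ∧ 2 ≤ m) ∧ ¬ (∃ m, (c, m) ∈ pvRuns l ∧ 3 ≤ m)

lemma pv_digit_iff (c : Char) :
    PySem.Chars.isdigit c = true ↔ c ∈ ['0','1','2','3','4','5','6','7','8','9'] := by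
  simp only [PySem.Chars.isdigit, Bool.and_eq_true, decide_eq_true_eq, List.mem_cons,
    List.not_mem_nil, or_false]
  have h0 : ∀ d : Char, (c = d ↔ c.val.toNat = d.val.toNat) :=
    fun d => ⟨fun h => h ▸ rfl, fun h => Char.ext (UInt32.toNat_inj.mp h)⟩
  simp only [Char.le_def, UInt32.le_iff_toNat_le, h0,
    show ('0').val.toNat = 48 from rfl, show ('1').val.toNat = 49 from rfl,
    show ('2').val.toNat = 50 from rfl, show ('3').val.toNat = 51 from rfl,
    show ('4').val.toNat = 52 from rfl, show ('5').val.toNat = 53 from rfl,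
    show ('6').val.toNat = 54 from rfl, show ('7').val.toNat = 55 from rfl,
    show ('8').val.toNat = 56 from rfl, show ('9').val.toNat = 57 from rfl]
  omega

lemma pv_repl_infix_repl {k n : Nat} {c c' : Char} (hk : 1 ≤ k) :
    List.replicate k c' <:+: List.replicate n c ↔ c' = c ∧ k ≤ n := by
  constructor
  · intro hi
    have hs := hi.sublist
    have hm : c' ∈ List.replicate n c := hs.mem (by simp; omega)
    exact ⟨List.eq_of_mem_replicate hm, by simpa using hs.length_le⟩
  · rintro ⟨heq, hkn⟩
    refine ⟨[], List.replicate (n - k) c, ?_⟩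
    rw [heq, List.nil_append, ← List.replicate_add, Nat.add_sub_cancel' hkn]

lemma pv_repl_infix_append_cons {k n : Nat} {c c' x : Char} {xs : List Char}
    (hk : 1 ≤ k) (hx : x ≠ c) :
    List.replicate k c' <:+: (List.replicate n c ++ x :: xs) ↔
      (c' = c ∧ k ≤ n) ∨ List.replicate k c' <:+: (x :: xs) := by
  constructor
  · rintro ⟨s, t, h⟩
    by_cases hs : n ≤ s.length
    · right
      have h' := congrArg (List.drop n) h
      rw [List.append_assoc, List.drop_append_of_le_length hs,
        List.drop_append_of_le_length (by simp), List.drop_replicate] at h'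
      simp only [Nat.sub_self, List.replicate_zero, List.nil_append] at h'
      exact ⟨s.drop n, t, by rw [List.append_assoc]; exact h'⟩
    · left
      push Not at hs
      have hc' : c' = c := by
        have e1 : ((s ++ List.replicate k c' ++ t))[s.length]? = some c' := by
          rw [List.append_assoc, List.getElem?_append_right (le_refl _)]
          rw [Nat.sub_self, List.getElem?_append_left (by simp; omega)]
          simp only [List.getElem?_replicate]
          rw [if_pos (by omega)]
        have e2 : ((List.replicate n c ++ x :: xs))[s.length]? = some c := by
          rw [List.getElem?_append_left (by simpa using hs)]
          simp [hs]
        rw [h, e2] at e1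
        exact (Option.some_inj.mp e1).symm
      refine ⟨hc', ?_⟩
      by_contra hlt
      push Not at hlt
      have e1 : ((s ++ List.replicate k c' ++ t))[n]? = some c' := by
        rw [List.append_assoc, List.getElem?_append_right (by omega)]
        rw [List.getElem?_append_left (by simp; omega)]
        simp only [List.getElem?_replicate]
        rw [if_pos (by omega)]
      have e2 : ((List.replicate n c ++ x :: xs))[n]? = some x := by
        rw [List.getElem?_append_right (by simp)]
        simp
      rw [h, e2] at e1
      exact hx (Option.some_inj.mp e1 ▸ hc' ▸ rfl)
  · rintro (hi1 | hi)
    · rcases hi1 with ⟨heq, hkn⟩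
      refine ⟨[], List.replicate (n - k) c ++ x :: xs, ?_⟩
      rw [heq, List.nil_append, ← List.append_assoc, ← List.replicate_add,
        Nat.add_sub_cancel' hkn]
    · exact hi.trans (List.suffix_append _ _).isInfix

lemma pv_runsAux_spec : ∀ (xs : List Char) (c c' : Char) (n k : Nat), 1 ≤ k → 1 ≤ n →
    (List.replicate k c' <:+: (List.replicate n c ++ xs) ↔
      ∃ m, (c', m) ∈ pvRunsAux c n xs ∧ k ≤ m)
  | [] => by
      intro c c' n k hk hn
      rw [List.append_nil, pv_repl_infix_repl hk]
      simp only [pvRunsAux, List.mem_singleton, Prod.mk.injEq]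
      constructor
      · rintro ⟨rfl, hkn⟩; exact ⟨n, ⟨rfl, rfl⟩, hkn⟩
      · rintro ⟨m, ⟨rfl, rfl⟩, hkm⟩; exact ⟨rfl, hkm⟩
  | x :: xs => by
      intro c c' n k hk hn
      by_cases hxc : x = c
      · subst hxc
        have hre : List.replicate n x ++ x :: xs = List.replicate (n + 1) x ++ xs := by
          rw [List.replicate_succ', List.append_assoc, List.singleton_append]
        rw [hre, pvRunsAux, if_pos rfl]
        exact pv_runsAux_spec xs x c' (n + 1) k hk (by omega)
      · rw [pvRunsAux, if_neg hxc, pv_repl_infix_append_cons hk hxc]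
        have hIH := pv_runsAux_spec xs x c' 1 k hk (le_refl 1)
        rw [show List.replicate 1 x ++ xs = x :: xs from by simp] at hIH
        rw [hIH]
        simp only [List.mem_cons, Prod.mk.injEq]
        constructor
        · rintro (⟨rfl, hkn⟩ | ⟨m, hm, hkm⟩)
          · exact ⟨n, Or.inl ⟨rfl, rfl⟩, hkn⟩
          · exact ⟨m, Or.inr hm, hkm⟩
        · rintro ⟨m, ⟨rfl, rfl⟩ | hm, hkm⟩
          · exact Or.inl ⟨rfl, hkm⟩
          · exact Or.inr ⟨m, hm, hkm⟩

lemma pv_runs_spec {k : Nat} (c' : Char) (l : List Char) (hk : 1 ≤ k) :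
    List.replicate k c' <:+: l ↔ ∃ m, (c', m) ∈ pvRuns l ∧ k ≤ m := by
  cases l with
  | nil =>
      simp only [pvRuns, List.not_mem_nil, false_and, exists_false, iff_false]
      intro h
      have := h.sublist.length_le
      simp at this
      omega
  | cons x xs =>
      have := pv_runsAux_spec xs x c' 1 k hk (le_refl 1)
      rw [show List.replicate 1 x ++ xs = x :: xs from by simp] at this
      simpa [pvRuns] using this

lemma pv_runs_infix2 (c : Char) (l : List Char) :
    (List.replicate 2 c <:+: l) ↔ ∃ m, (c, m) ∈ pvRuns l ∧ 2 ≤ m :=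
  pv_runs_spec c l (by norm_num)

lemma pv_runs_infix3 (c : Char) (l : List Char) :
    (List.replicate 3 c <:+: l) ↔ ∃ m, (c, m) ∈ pvRuns l ∧ 3 ≤ m :=
  pv_runs_spec c l (by norm_num)

lemma pv_dupLoopA_any (s : List Char) : ∀ ds : List Int, dupLoopA s ds =
    ds.any (fun d => PySem.Chars.isIn (PySem.List.pyRepeat (PySem.Int.toChars d) 2) s &&
      !(PySem.Chars.isIn (PySem.List.pyRepeat (PySem.Int.toChars d) 3) s))
  | [] => rfl
  | d :: ds => by
      rw [dupLoopA, List.any_cons, ← pv_dupLoopA_any s ds]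
      cases h : (PySem.Chars.isIn (PySem.List.pyRepeat (PySem.Int.toChars d) 2) s &&
          !(PySem.Chars.isIn (PySem.List.pyRepeat (PySem.Int.toChars d) 3) s)) <;>
        simp

set_option maxHeartbeats 1000000 in
lemma pv_A_iff (s : String) : dup_check s = true ↔
    ∃ c ∈ ['0','1','2','3','4','5','6','7','8','9'], pvQ s.toList c := by
  rw [dup_check, pv_dupLoopA_any,
    show PySem.List.pyRange 0 10 1 = [0,1,2,3,4,5,6,7,8,9] from by decide]
  simp only [List.any_cons, List.any_nil, Bool.or_eq_true, Bool.and_eq_true,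
    Bool.not_eq_true', Bool.or_false,
    show PySem.List.pyRepeat (PySem.Int.toChars 0) 2 = List.replicate 2 '0' from by decide,
    show PySem.List.pyRepeat (PySem.Int.toChars 1) 2 = List.replicate 2 '1' from by decide,
    show PySem.List.pyRepeat (PySem.Int.toChars 2) 2 = List.replicate 2 '2' from by decide,
    show PySem.List.pyRepeat (PySem.Int.toChars 3) 2 = List.replicate 2 '3' from by decide,
    show PySem.List.pyRepeat (PySem.Int.toChars 4) 2 = List.replicate 2 '4' from by decide,
    show PySem.List.pyRepeat (PySem.Int.toChars 5) 2 = List.replicate 2 '5' from by decide,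
    show PySem.List.pyRepeat (PySem.Int.toChars 6) 2 = List.replicate 2 '6' from by decide,
    show PySem.List.pyRepeat (PySem.Int.toChars 7) 2 = List.replicate 2 '7' from by decide,
    show PySem.List.pyRepeat (PySem.Int.toChars 8) 2 = List.replicate 2 '8' from by decide,
    show PySem.List.pyRepeat (PySem.Int.toChars 9) 2 = List.replicate 2 '9' from by decide,
    show PySem.List.pyRepeat (PySem.Int.toChars 0) 3 = List.replicate 3 '0' from by decide,
    show PySem.List.pyRepeat (PySem.Int.toChars 1) 3 = List.replicate 3 '1' from by decide,
    show PySem.List.pyRepeat (PySem.Int.toChars 2) 3 = List.replicate 3 '2' from by decide,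
    show PySem.List.pyRepeat (PySem.Int.toChars 3) 3 = List.replicate 3 '3' from by decide,
    show PySem.List.pyRepeat (PySem.Int.toChars 4) 3 = List.replicate 3 '4' from by decide,
    show PySem.List.pyRepeat (PySem.Int.toChars 5) 3 = List.replicate 3 '5' from by decide,
    show PySem.List.pyRepeat (PySem.Int.toChars 6) 3 = List.replicate 3 '6' from by decide,
    show PySem.List.pyRepeat (PySem.Int.toChars 7) 3 = List.replicate 3 '7' from by decide,
    show PySem.List.pyRepeat (PySem.Int.toChars 8) 3 = List.replicate 3 '8' from by decide,
    show PySem.List.pyRepeat (PySem.Int.toChars 9) 3 = List.replicate 3 '9' from by decide,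
    PySem.Chars.isIn_iff_infix, PySem.Chars.isIn_eq_false_iff,
    pv_runs_infix2, pv_runs_infix3]
  simp only [pvQ, List.mem_cons, List.not_mem_nil, or_false]
  constructor
  · rintro (h | h | h | h | h | h | h | h | h | h)
    · exact ⟨'0', Or.inl rfl, h⟩
    · exact ⟨'1', Or.inr (Or.inl rfl), h⟩
    · exact ⟨'2', Or.inr (Or.inr (Or.inl rfl)), h⟩
    · exact ⟨'3', Or.inr (Or.inr (Or.inr (Or.inl rfl))), h⟩
    · exact ⟨'4', Or.inr (Or.inr (Or.inr (Or.inr (Or.inl rfl)))), h⟩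
    · exact ⟨'5', Or.inr (Or.inr (Or.inr (Or.inr (Or.inr (Or.inl rfl))))), h⟩
    · exact ⟨'6', Or.inr (Or.inr (Or.inr (Or.inr (Or.inr (Or.inr (Or.inl rfl)))))), h⟩
    · exact ⟨'7', Or.inr (Or.inr (Or.inr (Or.inr (Or.inr (Or.inr (Or.inr (Or.inl rfl))))))), h⟩
    · exact ⟨'8', Or.inr (Or.inr (Or.inr (Or.inr (Or.inr (Or.inr (Or.inr (Or.inr (Or.inl rfl)))))))), h⟩
    · exact ⟨'9', Or.inr (Or.inr (Or.inr (Or.inr (Or.inr (Or.inr (Or.inr (Or.inr (Or.inr (rfl))))))))), h⟩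
  · rintro ⟨c, hc, hq⟩
    rcases hc with rfl | rfl | rfl | rfl | rfl | rfl | rfl | rfl | rfl | rfl <;>
      first | exact Or.inl hq | exact Or.inr (Or.inl hq) | exact Or.inr (Or.inr (Or.inl hq)) | exact Or.inr (Or.inr (Or.inr (Or.inl hq))) | exact Or.inr (Or.inr (Or.inr (Or.inr (Or.inl hq)))) | exact Or.inr (Or.inr (Or.inr (Or.inr (Or.inr (Or.inl hq))))) | exact Or.inr (Or.inr (Or.inr (Or.inr (Or.inr (Or.inr (Or.inl hq)))))) | exact Or.inr (Or.inr (Or.inr (Or.inr (Or.inr (Or.inr (Or.inr (Or.inl hq))))))) | exact Or.inr (Or.inr (Or.inr (Or.inr (Or.inr (Or.inr (Or.inr (Or.inr (Or.inl hq)))))))) | exact Or.inr (Or.inr (Or.inr (Or.inr (Or.inr (Or.inr (Or.inr (Or.inr (Or.inr hq))))))))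

lemma pv_B_iff (s : String) : dup_check_alt s = true ↔
    ∃ c, PySem.Chars.isdigit c = true ∧ (c, 2) ∈ pvRuns s.toList ∧
      ¬ (∃ m, (c, m) ∈ pvRuns s.toList ∧ 3 ≤ m) := by
  rw [dup_check_alt]
  simp only [List.any_eq_true, Bool.and_eq_true, Bool.not_eq_true',
    beq_iff_eq, PySem.Set.contains_eq_listContains, List.contains_eq_mem,
    decide_eq_false_iff_not, PySem.Set.mem_ofList, List.mem_map, List.mem_filter,
    decide_eq_true_eq]
  constructor
  · rintro ⟨⟨c, m⟩, hmem, ⟨hd, rfl⟩, hni⟩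
    refine ⟨c, hd, hmem, ?_⟩
    rintro ⟨m', hm', h3⟩
    exact hni ⟨(c, m'), ⟨hm', h3⟩, rfl⟩
  · rintro ⟨c, hd, h2, h3⟩
    refine ⟨(c, 2), h2, ⟨hd, rfl⟩, ?_⟩
    rintro ⟨⟨c', m'⟩, ⟨hm', h3'⟩, rfl⟩
    exact h3 ⟨m', hm', h3'⟩

-- ===== VERDICT (by name: the statement is the Claim_ definition above) =====
theorem dup_check_spec : Claim_equal_dup_check := by
  unfold Claim_equal_dup_check Spec_dup_check
  intro s _
  rw [Bool.eq_iff_iff, pv_A_iff, pv_B_iff]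
  constructor
  · rintro ⟨c, hc, ⟨m, hm, h2⟩, h3⟩
    refine ⟨c, (pv_digit_iff c).mpr hc, ?_, h3⟩
    have hm3 : ¬ 3 ≤ m := fun h => h3 ⟨m, hm, h⟩
    have : m = 2 := by omega
    exact this ▸ hm
  · rintro ⟨c, hc, h2, h3⟩
    exact ⟨c, (pv_digit_iff c).mp hc, ⟨2, h2, le_refl 2⟩, h3⟩
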